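-- pv_equiv track=rewrite | github.com/AegonnI/AI-assistant | ultimate_financial_analyzer.py | _split_text_into_parts
-- ===== SOURCE A (Python) =====
-- from typing import Dict, Optional, Any, Tuple, List, Set
--
-- def _split_text_into_parts(text: str, num_parts: int = 5) -> List[str]:
--     """Разделить текст на части по словам С ПЕРЕКРЫТИЕМ для избежания разрезания строк"""
--     text = " ".join(text.split())
--     if len(text) == 0:
--         return []
--     base_size = len(text) // num_parts
--     overlap = int(base_size * 0.15)
--     parts = []
--     for i in range(num_parts):
--         start = max(0, i * base_size - overlap) if i > 0 else 0
--         if i == num_parts - 1: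
--             parts.append(text[start:].strip())
--         else:
--             end = (i + 1) * base_size + overlap
--             while end > start and text[end] != ' ':
--                 end -= 1
--             if end <= start:
--                 end = min(start + base_size, len(text))
--             parts.append(text[start:end].strip())
--     return [p for p in parts if p]
-- ===== SOURCE B (Python) =====
-- from typing import List
--
-- def _split_text_into_parts(text: str, num_parts: int = 5) -> List[str]:
--     """Same split, but part boundaries are found by binary search on a
--     precomputed index of space positions instead of a backward character scan."""
--     text = " ".join(text.split())
--     n = len(text)
--     if n == 0:
--         return []
--     if num_parts <= 0:
--         return []
--     base_size = n // num_parts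
--     overlap = int(base_size * 0.15)
--     spaces = [i for i, c in enumerate(text) if c == ' ']
--     parts = []
--     for i in range(num_parts):
--         start = max(0, i * base_size - overlap) if i > 0 else 0
--         if i == num_parts - 1:
--             piece = text[start:].strip()
--         else:
--             target = (i + 1) * base_size + overlap
--             # rightmost space position p with start < p <= target
--             lo, hi = 0, len(spaces)
--             while lo < hi:
--                 mid = (lo + hi) // 2
--                 if target < spaces[mid]:
--                     hi = mid
--                 else:
--                     lo = mid + 1
--             if lo > 0 and spaces[lo - 1] > start:
--                 end = spaces[lo - 1]
--             else:
--                 end = min(start + base_size, n)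
--             piece = text[start:end].strip()
--         if piece:
--             parts.append(piece)
--     return parts
-- ===== Notes on version B (the rewrite author's own statement) =====
-- stated objective: alternative
-- what changed: B precomputes the list of all space positions in the normalized text once and finds each part's word boundary by binary search on that index, replacing A's per-part backward character scan.
import Mathlib
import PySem

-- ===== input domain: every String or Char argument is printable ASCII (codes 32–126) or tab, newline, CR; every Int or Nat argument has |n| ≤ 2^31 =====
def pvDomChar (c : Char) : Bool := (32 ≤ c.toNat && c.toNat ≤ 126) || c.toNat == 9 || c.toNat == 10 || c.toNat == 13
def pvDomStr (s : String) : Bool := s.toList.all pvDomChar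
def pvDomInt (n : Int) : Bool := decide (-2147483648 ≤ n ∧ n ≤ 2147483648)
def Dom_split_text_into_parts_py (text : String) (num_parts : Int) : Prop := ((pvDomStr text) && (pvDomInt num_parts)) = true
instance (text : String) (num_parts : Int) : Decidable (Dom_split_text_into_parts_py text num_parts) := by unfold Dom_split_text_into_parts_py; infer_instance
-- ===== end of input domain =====

-- B replaces A's per-part backward character scan with a precomputed index of
-- space positions searched by binary search (different data structure/algorithm).

-- shared helper: exact integer model of CPython's `int(base_size * 0.15)`
-- (0.15 is the double 5404319552844595 / 2^55; the product is rounded to 53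
-- significant bits, round-to-nearest ties-to-even, then truncated toward zero).
def pvMul015Nat (n : Nat) : Nat :=
  let p := n * 5404319552844595
  let L := PySem.Int.bitLength (p : Int)
  let r :=
    if L ≤ 53 then p
    else
      let sh := L - 53
      let q := p / 2 ^ sh
      let rem := p % 2 ^ sh
      let half := 2 ^ (sh - 1)
      (if half < rem ∨ (rem = half ∧ q % 2 = 1) then q + 1 else q) * 2 ^ sh
  r / 2 ^ 55

def pvMul015 (b : Int) : Int :=
  if b < 0 then -(pvMul015Nat b.natAbs : Int) else (pvMul015Nat b.natAbs : Int)

-- shared helper: `" ".join(text.split())`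
def pvNormalize (text : String) : List Char :=
  PySem.Chars.join [' '] (PySem.Chars.split₀ text.toList)

-- ===== PORT A =====
-- the backward scan `while end > start and text[end] != ' ': end -= 1`
-- (the `none` branch is where Python raises IndexError; unreachable under Pre_)
def scanA (t : List Char) (start e : Int) : Int :=
  if e > start then
    match PySem.List.pyGet? t e with
    | some c => if c ≠ ' ' then scanA t start (e - 1) else e
    | none => e
  else e
termination_by (e - start).toNat
decreasing_by omega

def split_text_into_parts_py (text : String) (num_parts : Int) : List String :=
  let t := pvNormalize text
  if (t.length : Int) = 0 then []
  else
    let base_size := PySem.Int.floordiv (t.length : Int) num_parts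
    let overlap := pvMul015 base_size
    let parts := (PySem.List.pyRange 0 num_parts 1).foldl (fun parts i =>
      let start := if i > 0 then max 0 (i * base_size - overlap) else (0 : Int)
      if i = num_parts - 1 then
        parts ++ [String.ofList (PySem.Chars.strip (PySem.List.slice t (some start) none))]
      else
        let e0 := (i + 1) * base_size + overlap
        let e1 := scanA t start e0
        let e2 := if e1 ≤ start then min (start + base_size) (t.length : Int) else e1
        parts ++ [String.ofList (PySem.Chars.strip (PySem.List.slice t (some start) (some e2)))]) []
    parts.filter (fun p => p != "")

-- ===== PORT B =====
-- index of all space positions in the normalized text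
def pvSpaces (t : List Char) : List Int :=
  ((PySem.List.enumerate t 0).filter (fun p => p.2 == ' ')).map (·.1)

-- hand-written binary search from Source B (rightmost insertion point for x)
def bisR (a : List Int) (x lo hi : Int) : Int :=
  if h : lo < hi then
    let mid := PySem.Int.floordiv (lo + hi) 2
    if x < PySem.List.pyGetD a mid 0 then bisR a x lo mid else bisR a x (mid + 1) hi
  else lo
termination_by (hi - lo).toNat
decreasing_by
  all_goals
    have := PySem.Int.floordiv_eq_ediv_of_pos (a := lo + hi) (b := 2) (by omega)
    omega

def split_text_into_parts_py_alt (text : String) (num_parts : Int) : List String :=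
  let t := pvNormalize text
  let n : Int := t.length
  if n = 0 then []
  else if num_parts ≤ 0 then []
  else
    let base_size := PySem.Int.floordiv n num_parts
    let overlap := pvMul015 base_size
    let spaces := pvSpaces t
    (PySem.List.pyRange 0 num_parts 1).foldl (fun parts i =>
      let start := if i > 0 then max 0 (i * base_size - overlap) else (0 : Int)
      let piece :=
        if i = num_parts - 1 then
          PySem.Chars.strip (PySem.List.slice t (some start) none)
        else
          let target := (i + 1) * base_size + overlap
          let lo := bisR spaces target 0 (spaces.length : Int)
          let e := if 0 < lo ∧ start < PySem.List.pyGetD spaces (lo - 1) 0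
                   then PySem.List.pyGetD spaces (lo - 1) 0
                   else min (start + base_size) n
          PySem.Chars.strip (PySem.List.slice t (some start) (some e))
      if piece != [] then parts ++ [String.ofList piece] else parts) []

-- ===== PRECONDITION & SPEC =====
-- Pre_ excludes only num_parts = 0 on text with at least one word, where A
-- raises ZeroDivisionError.
def Pre_split_text_into_parts_py (text : String) (num_parts : Int) : Prop :=
  num_parts ≠ 0 ∨ PySem.Chars.split₀ text.toList = []
instance (text : String) (num_parts : Int) : Decidable (Pre_split_text_into_parts_py text num_parts) := by unfold Pre_split_text_into_parts_py; infer_instance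

def pvWitness_split_text_into_parts_py : String × Int := ("ab cd ef", 3)

def Spec_split_text_into_parts_py (text : String) (num_parts : Int) (out : List String) : Prop := out = split_text_into_parts_py_alt text num_parts
instance (text : String) (num_parts : Int) (out : List String) : Decidable (Spec_split_text_into_parts_py text num_parts out) := by unfold Spec_split_text_into_parts_py; infer_instance

-- ===== CLAIM (what is proved, stated in full; the proofs are below) =====
def Claim_equal_split_text_into_parts_py : Prop := ∀ (text : String) (num_parts : Int), Dom_split_text_into_parts_py text num_parts → Pre_split_text_into_parts_py text num_parts → Spec_split_text_into_parts_py text num_parts (split_text_into_parts_py text num_parts)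


-- ===== LEMMAS AND PROOFS =====

theorem pvRound_le (p E H : Nat) :
    (if H < p % E ∨ (p % E = H ∧ p / E % 2 = 1) then p / E + 1 else p / E) * E ≤ p + E := by
  have hq : p / E * E ≤ p := Nat.div_mul_le_self _ _
  split
  · calc (p / E + 1) * E = p / E * E + E := by rw [Nat.add_mul, one_mul]
    _ ≤ p + E := Nat.add_le_add_right hq E
  · exact le_trans hq (Nat.le_add_right _ _)

theorem pvMul015Nat_lt (n : Nat) (h : 1 ≤ n) : pvMul015Nat n < n := by
  unfold pvMul015Nat
  simp only []
  split
  · refine Nat.div_lt_of_lt_mul ?_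
    have h2M : (5404319552844595 : Nat) < 2 ^ 55 := by norm_num
    calc n * 5404319552844595 < n * 2 ^ 55 :=
          Nat.mul_lt_mul_of_le_of_lt (le_refl n) h2M (by omega)
    _ = 2 ^ 55 * n := Nat.mul_comm _ _
  · rename_i hL53
    have hp0 : (n * 5404319552844595 : Nat) ≠ 0 := by positivity
    have hlow : 2 ^ (PySem.Int.bitLength ((n * 5404319552844595 : Nat) : Int) - 1) ≤ n * 5404319552844595 := by
      have := PySem.Int.two_pow_bitLength_le ((n * 5404319552844595 : Nat) : Int) (by exact_mod_cast hp0)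
      simpa using this
    have hEp : 2 ^ (PySem.Int.bitLength ((n * 5404319552844595 : Nat) : Int) - 53) ≤ n * 5404319552844595 :=
      le_trans (Nat.pow_le_pow_right (by omega) (by omega)) hlow
    refine Nat.div_lt_of_lt_mul ?_
    calc _ ≤ n * 5404319552844595 + 2 ^ (PySem.Int.bitLength ((n * 5404319552844595 : Nat) : Int) - 53) :=
          pvRound_le _ _ _
    _ ≤ n * 5404319552844595 + n * 5404319552844595 := Nat.add_le_add_left hEp _
    _ = n * (2 * 5404319552844595) := by ring
    _ < n * 2 ^ 55 := Nat.mul_lt_mul_of_le_of_lt (le_refl n) (by norm_num) (by omega)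
    _ = 2 ^ 55 * n := Nat.mul_comm _ _

theorem pvMul015_lt (b : Int) (h : 1 ≤ b) : pvMul015 b < b := by
  have h1 : ¬ b < 0 := by omega
  have h2 := pvMul015Nat_lt b.natAbs (by omega)
  unfold pvMul015
  simp only [h1, if_false]
  omega

theorem pvMul015_zero : pvMul015 0 = 0 := by decide

theorem mem_pvSpaces (t : List Char) (q : Int) :
    q ∈ pvSpaces t ↔ ∃ (k : Nat) (hk : k < t.length), q = (k : Int) ∧ t[k] = ' ' := by
  unfold pvSpaces
  simp only [List.mem_map, List.mem_filter, PySem.List.mem_enumerate_iff]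
  constructor
  · rintro ⟨⟨a, c⟩, ⟨⟨k, hk, hpq⟩, hsp⟩, rfl⟩
    cases hpq
    exact ⟨k, hk, by simp, by simpa using hsp⟩
  · rintro ⟨k, hk, rfl, hsp⟩
    exact ⟨((k : Int), t[k]), ⟨⟨k, hk, by simp⟩, by simpa using hsp⟩, rfl⟩

theorem pairwise_pvSpaces (t : List Char) : (pvSpaces t).Pairwise (· < ·) := by
  unfold pvSpaces
  refine List.Pairwise.map _ ?_ ((PySem.List.pairwise_lt_enumerate t 0).filter _)
  intro a b hab
  exact hab

theorem pvMono (a : List Int) (hs : a.Pairwise (· < ·)) (i j : Nat) (hij : i ≤ j)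
    (hj : j < a.length) : a[i]'(Nat.lt_of_le_of_lt hij hj) ≤ a[j] := by
  rcases Nat.lt_or_ge i j with hlt | hge
  · exact le_of_lt (List.pairwise_iff_getElem.mp hs i j (Nat.lt_of_le_of_lt hij hj) hj hlt)
  · have : i = j := by omega
    subst this; exact le_refl _

theorem bisR_inv (a : List Int) (x lo hi : Int)
    (hs : a.Pairwise (· < ·)) (h0 : 0 ≤ lo) (hlh : lo ≤ hi) (hh : hi ≤ (a.length : Int))
    (hlow : ∀ k : Nat, (k : Int) < lo → ∀ hk : k < a.length, a[k] ≤ x)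
    (hhigh : ∀ k : Nat, hi ≤ (k : Int) → ∀ hk : k < a.length, x < a[k]) :
    lo ≤ bisR a x lo hi ∧ bisR a x lo hi ≤ hi ∧
      (∀ k : Nat, (k : Int) < bisR a x lo hi → ∀ hk : k < a.length, a[k] ≤ x) ∧
      (∀ k : Nat, bisR a x lo hi ≤ (k : Int) → ∀ hk : k < a.length, x < a[k]) := by
  have hmono := pvMono a hs
  rw [bisR]
  split
  · rename_i hlth
    have hmid := PySem.Int.floordiv_eq_ediv_of_pos (a := lo + hi) (b := 2) (by omega)
    set mid := PySem.Int.floordiv (lo + hi) 2 with hmiddef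
    have hmb : lo ≤ mid ∧ mid < hi := by omega
    have hmrange : mid.toNat < a.length := by omega
    have hget : PySem.List.pyGetD a mid 0 = a[mid.toNat] :=
      PySem.List.pyGetD_eq_getElem _ _ (by omega) (by omega)
    simp only []
    split
    · rename_i hxlt
      have := bisR_inv a x lo mid hs h0 (by omega) (by omega) hlow ?_
      · exact ⟨this.1, by omega, this.2.2.1, this.2.2.2⟩
      · intro k hk hkr
        have h1 : a[mid.toNat] ≤ a[k] := hmono mid.toNat k (by omega) hkr
        rw [hget] at hxlt
        omega
    · rename_i hxge
      have := bisR_inv a x (mid + 1) hi hs (by omega) (by omega) hh ?_ hhigh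
      · exact ⟨by omega, this.2.1, this.2.2.1, this.2.2.2⟩
      · intro k hk hkr
        have h1 : a[k] ≤ a[mid.toNat] := hmono k mid.toNat (by omega) hmrange
        rw [hget] at hxge
        omega
  · exact ⟨le_refl _, by omega, fun k hk hkr => hlow k (by omega) hkr, fun k hk hkr => hhigh k (by omega) hkr⟩
termination_by (hi - lo).toNat
decreasing_by
  all_goals omega

theorem pyGet?_int (t : List Char) (e : Int) (h0 : 0 ≤ e) (he : e < (t.length : Int)) :
    PySem.List.pyGet? t e = some (t[e.toNat]'(by omega)) := by
  have h1 : PySem.List.pyGet? t e = t[e.toNat]? := by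
    conv_lhs => rw [show e = ((e.toNat : Nat) : Int) by omega]
    exact PySem.List.pyGet?_natCast t e.toNat
  rw [h1]
  exact List.getElem?_eq_getElem (by omega)

theorem scanA_none (t : List Char) (start e : Int) (h0 : 0 ≤ start) (he : e < (t.length : Int))
    (hall : ∀ k : Nat, start < (k : Int) → (k : Int) ≤ e → ∀ hk : k < t.length, t[k] ≠ ' ') :
    scanA t start e ≤ start := by
  rw [scanA]
  split
  · rename_i hgt
    rw [pyGet?_int t e (by omega) he]
    simp only []
    have hne : t[e.toNat]'(by omega) ≠ ' ' := hall e.toNat (by omega) (by omega) (by omega)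
    rw [if_pos hne]
    exact scanA_none t start (e - 1) h0 (by omega)
      (fun k hk1 hk2 hk3 => hall k hk1 (by omega) hk3)
  · omega
termination_by (e - start).toNat
decreasing_by omega

theorem scanA_finds (t : List Char) (start e : Int) (k : Nat)
    (h0 : 0 ≤ start) (he : e < (t.length : Int)) (hk : k < t.length)
    (hks : start < (k : Int)) (hke : (k : Int) ≤ e) (hsp : t[k] = ' ')
    (hmax : ∀ j : Nat, (k : Int) < (j : Int) → (j : Int) ≤ e → ∀ hj : j < t.length, t[j] ≠ ' ') :
    scanA t start e = (k : Int) := by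
  rw [scanA]
  rw [if_pos (by omega)]
  rw [pyGet?_int t e (by omega) he]
  simp only []
  by_cases hek : e = (k : Int)
  · subst hek
    simp [hsp]
  · have hne : t[e.toNat]'(by omega) ≠ ' ' := hmax e.toNat (by omega) (by omega) (by omega)
    rw [if_pos hne]
    exact scanA_finds t start (e - 1) k h0 (by omega) hk hks (by omega) hsp
      (fun j hj1 hj2 hj3 => hmax j hj1 (by omega) hj3)
termination_by (e - start).toNat
decreasing_by omega

theorem end_eq (t : List Char) (start target F : Int)
    (h0 : 0 ≤ start) (ht : target < (t.length : Int)) :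
    (if scanA t start target ≤ start then F else scanA t start target) =
      (if 0 < bisR (pvSpaces t) target 0 ((pvSpaces t).length : Int) ∧
          start < PySem.List.pyGetD (pvSpaces t) (bisR (pvSpaces t) target 0 ((pvSpaces t).length : Int) - 1) 0
       then PySem.List.pyGetD (pvSpaces t) (bisR (pvSpaces t) target 0 ((pvSpaces t).length : Int) - 1) 0
       else F) := by
  have hs := pairwise_pvSpaces t
  obtain ⟨hr0, hrlen, hP1, hP2⟩ :=
    bisR_inv (pvSpaces t) target 0 ((pvSpaces t).length : Int) hs (le_refl 0)
      (by exact_mod_cast Int.natCast_nonneg _) (le_refl _)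
      (fun k hk _ => absurd hk (by omega))
      (fun k hk hklen => absurd hk (by omega))
  set a := pvSpaces t with ha
  set r := bisR a target 0 ((a.length : Int)) with hr
  clear_value a r
  have hguard : ∀ _ : 0 < r, ∀ hm : (r - 1).toNat < a.length,
      ∃ (q : Nat) (hq : q < t.length), a[(r - 1).toNat] = (q : Int) ∧ t[q] = ' ' ∧
        a[(r - 1).toNat] ≤ target := by
    intro hpos hm
    obtain ⟨v, hv⟩ : ∃ v, a[(r - 1).toNat]'hm = v := ⟨_, rfl⟩
    have hmem : v ∈ pvSpaces t := by
      rw [← ha]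
      have := List.getElem_mem hm
      rwa [hv] at this
    rw [mem_pvSpaces] at hmem
    obtain ⟨q, hq, hqv, hqsp⟩ := hmem
    refine ⟨q, hq, by rw [hv, hqv], hqsp, ?_⟩
    exact hP1 (r - 1).toNat (by omega) hm
  have hgetD : ∀ hm : (r - 1).toNat < a.length, 0 ≤ r - 1 →
      PySem.List.pyGetD a (r - 1) 0 = a[(r - 1).toNat]'hm := by
    intro hm hp
    exact PySem.List.pyGetD_eq_getElem _ _ (by omega) (by omega)
  by_cases hex : ∃ k : Nat, start < (k : Int) ∧ (k : Int) ≤ target ∧ t[k]? = some ' '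
  · obtain ⟨k0, hk01, hk02, hk03⟩ := hex
    have htgt0 : 0 ≤ target := le_trans (by exact_mod_cast Int.natCast_nonneg k0) hk02
    set P : Nat → Prop := fun k => start < (k : Int) ∧ (k : Int) ≤ target ∧ t[k]? = some ' ' with hP
    set K := Nat.findGreatest P target.toNat with hK
    have hPK : P K := Nat.findGreatest_spec (m := k0) (by omega) ⟨hk01, hk02, hk03⟩
    have hGr : ∀ j : Nat, K < j → j ≤ target.toNat → ¬ P j :=
      fun j h1 h2 => Nat.findGreatest_is_greatest h1 h2
    obtain ⟨hK1, hK2, hK3⟩ := hPK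
    have hKlen : K < t.length := by
      by_contra hcon
      rw [List.getElem?_eq_none_iff.mpr (by omega)] at hK3
      exact absurd hK3 (by simp)
    have hKsp : t[K] = ' ' := by
      rw [List.getElem?_eq_getElem hKlen] at hK3
      exact Option.some.inj hK3
    have hmax : ∀ j : Nat, (K : Int) < (j : Int) → (j : Int) ≤ target → ∀ hj : j < t.length, t[j] ≠ ' ' := by
      intro j hj1 hj2 hj hsp
      exact hGr j (by omega) (by omega) ⟨by omega, hj2, by rw [List.getElem?_eq_getElem hj]; simp [hsp]⟩
    have hA : scanA t start target = (K : Int) :=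
      scanA_finds t start target K h0 ht hKlen hK1 hK2 hKsp hmax
    have hKmem : (K : Int) ∈ a := by
      rw [ha, mem_pvSpaces]
      exact ⟨K, hKlen, rfl, hKsp⟩
    obtain ⟨idx, hidx, hidxv⟩ := List.getElem_of_mem hKmem
    have hidxr : (idx : Int) < r := by
      by_contra hcon
      have := hP2 idx (by omega) hidx
      omega
    have hrpos : 0 < r := by omega
    have hm : (r - 1).toNat < a.length := by omega
    obtain ⟨q, hq, hqv, hqsp, hqle⟩ := hguard hrpos hm
    have hle1 : (K : Int) ≤ a[(r - 1).toNat] := by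
      rw [← hidxv]
      exact pvMono a hs idx (r - 1).toNat (by omega) hm
    have hqK : q ≤ K := by
      by_contra hcon
      exact hGr q (by omega) (by omega) ⟨by omega, by omega, by rw [List.getElem?_eq_getElem hq]; simp [hqsp]⟩
    have haK : a[(r - 1).toNat] = (K : Int) := by omega
    rw [hA, if_neg (by omega), if_pos ⟨hrpos, by rw [hgetD hm (by omega), haK]; omega⟩,
      hgetD hm (by omega), haK]
  · rw [not_exists] at hex
    simp only [not_and] at hex
    have hall : ∀ k : Nat, start < (k : Int) → (k : Int) ≤ target → ∀ hk : k < t.length, t[k] ≠ ' ' := by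
      intro k h1 h2 hk hsp
      exact hex k h1 h2 (by rw [List.getElem?_eq_getElem hk]; simp [hsp])
    have hA : scanA t start target ≤ start := scanA_none t start target h0 ht hall
    rw [if_pos hA]
    by_cases hc : 0 < r ∧ start < PySem.List.pyGetD a (r - 1) 0
    · exfalso
      have hrpos := hc.1
      have hm : (r - 1).toNat < a.length := by omega
      obtain ⟨q, hq, hqv, hqsp, hqle⟩ := hguard hrpos hm
      have hg := hgetD hm (by omega)
      exact hall q (by omega) (by omega) hq hqsp
    · rw [if_neg hc]

theorem ofList_bne_empty (P : List Char) : (String.ofList P != "") = (P != []) := by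
  by_cases hP : P = []
  · simp [hP]
  · have h2 : String.ofList P ≠ "" := by
      rw [show ("" : String) = String.ofList [] from rfl]
      simp only [ne_eq, String.ofList_inj]
      exact hP
    rw [bne_iff_ne.mpr h2, bne_iff_ne.mpr hP]

theorem step_acc (acc2 : List String) (P : List Char) :
    acc2 ++ List.filter (fun p => p != "") [String.ofList P]
      = if (P != []) = true then acc2 ++ [String.ofList P] else acc2 := by
  by_cases hP : P = []
  · simp [hP]
  · simp [ofList_bne_empty, hP]

theorem loop_eq (t : List Char) (np b ov : Int) (l : List Int)
    (acc1 acc2 : List String) (hacc : acc1.filter (fun p => p != "") = acc2)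
    (htar : ∀ i ∈ l, i ≠ np - 1 → (i + 1) * b + ov < (t.length : Int)) :
    (l.foldl (fun parts i =>
        if i = np - 1 then
          parts ++ [String.ofList (PySem.Chars.strip (PySem.List.slice t (some (if i > 0 then max 0 (i * b - ov) else 0)) none))]
        else
          parts ++ [String.ofList (PySem.Chars.strip (PySem.List.slice t
            (some (if i > 0 then max 0 (i * b - ov) else 0))
            (some (if scanA t (if i > 0 then max 0 (i * b - ov) else 0) ((i + 1) * b + ov) ≤ (if i > 0 then max 0 (i * b - ov) else 0)
                   then min ((if i > 0 then max 0 (i * b - ov) else 0) + b) (t.length : Int)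
                   else scanA t (if i > 0 then max 0 (i * b - ov) else 0) ((i + 1) * b + ov)))))]) acc1).filter (fun p => p != "")
    = l.foldl (fun parts i =>
        if ((if i = np - 1 then
               PySem.Chars.strip (PySem.List.slice t (some (if i > 0 then max 0 (i * b - ov) else 0)) none)
             else
               PySem.Chars.strip (PySem.List.slice t
                 (some (if i > 0 then max 0 (i * b - ov) else 0))
                 (some (if 0 < bisR (pvSpaces t) ((i + 1) * b + ov) 0 ((pvSpaces t).length : Int) ∧ (if i > 0 then max 0 (i * b - ov) else 0) < PySem.List.pyGetD (pvSpaces t) (bisR (pvSpaces t) ((i + 1) * b + ov) 0 ((pvSpaces t).length : Int) - 1) 0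
                        then PySem.List.pyGetD (pvSpaces t) (bisR (pvSpaces t) ((i + 1) * b + ov) 0 ((pvSpaces t).length : Int) - 1) 0
                        else min ((if i > 0 then max 0 (i * b - ov) else 0) + b) (t.length : Int))))) != [])
        then parts ++ [String.ofList (if i = np - 1 then
               PySem.Chars.strip (PySem.List.slice t (some (if i > 0 then max 0 (i * b - ov) else 0)) none)
             else
               PySem.Chars.strip (PySem.List.slice t
                 (some (if i > 0 then max 0 (i * b - ov) else 0))
                 (some (if 0 < bisR (pvSpaces t) ((i + 1) * b + ov) 0 ((pvSpaces t).length : Int) ∧ (if i > 0 then max 0 (i * b - ov) else 0) < PySem.List.pyGetD (pvSpaces t) (bisR (pvSpaces t) ((i + 1) * b + ov) 0 ((pvSpaces t).length : Int) - 1) 0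
                        then PySem.List.pyGetD (pvSpaces t) (bisR (pvSpaces t) ((i + 1) * b + ov) 0 ((pvSpaces t).length : Int) - 1) 0
                        else min ((if i > 0 then max 0 (i * b - ov) else 0) + b) (t.length : Int)))))]
        else parts) acc2 := by
  induction l generalizing acc1 acc2 hacc with
  | nil => simpa using hacc
  | cons i l ih =>
    simp only [List.foldl_cons]
    by_cases hi : i = np - 1
    · simp only [if_pos hi]
      apply ih
      · rw [List.filter_append, hacc, step_acc]
      · intro j hj hjne
        exact htar j (List.mem_cons_of_mem i hj) hjne
    · simp only [if_neg hi]
      have hstart : (0 : Int) ≤ (if i > 0 then max 0 (i * b - ov) else 0) := by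
        split
        · exact le_max_left 0 _
        · exact le_refl 0
      have hend : (if scanA t (if i > 0 then max 0 (i * b - ov) else 0) ((i + 1) * b + ov) ≤ (if i > 0 then max 0 (i * b - ov) else 0)
                   then min ((if i > 0 then max 0 (i * b - ov) else 0) + b) (t.length : Int)
                   else scanA t (if i > 0 then max 0 (i * b - ov) else 0) ((i + 1) * b + ov)) = (if 0 < bisR (pvSpaces t) ((i + 1) * b + ov) 0 ((pvSpaces t).length : Int) ∧ (if i > 0 then max 0 (i * b - ov) else 0) < PySem.List.pyGetD (pvSpaces t) (bisR (pvSpaces t) ((i + 1) * b + ov) 0 ((pvSpaces t).length : Int) - 1) 0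
                        then PySem.List.pyGetD (pvSpaces t) (bisR (pvSpaces t) ((i + 1) * b + ov) 0 ((pvSpaces t).length : Int) - 1) 0
                        else min ((if i > 0 then max 0 (i * b - ov) else 0) + b) (t.length : Int)) :=
        end_eq t (if i > 0 then max 0 (i * b - ov) else 0) ((i + 1) * b + ov) (min ((if i > 0 then max 0 (i * b - ov) else 0) + b) (t.length : Int)) hstart
          (htar i (List.mem_cons_self ..) hi)
      rw [hend]
      apply ih
      · rw [List.filter_append, hacc, step_acc]
      · intro j hj hjne
        exact htar j (List.mem_cons_of_mem i hj) hjne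

-- ===== VERDICT (by name: the statement is the Claim_ definition above) =====
theorem split_text_into_parts_py_spec : Claim_equal_split_text_into_parts_py := by
  intro text np hdom hpre
  unfold Spec_split_text_into_parts_py
  unfold split_text_into_parts_py split_text_into_parts_py_alt
  simp only []
  by_cases h0 : ((pvNormalize text).length : Int) = 0
  · rw [if_pos h0, if_pos h0]
  · rw [if_neg h0, if_neg h0]
    have hnp : np ≠ 0 := by
      rcases hpre with h | h
      · exact h
      · exfalso
        have : pvNormalize text = [] := by
          unfold pvNormalize
          rw [h]
          exact PySem.Chars.join_nil [' ']
        rw [this] at h0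
        simp at h0
    by_cases hneg : np ≤ 0
    · rw [if_pos hneg]
      rw [PySem.List.pyRange_one_eq_nil hneg]
      simp
    · rw [if_neg hneg]
      have hL1 : 1 ≤ ((pvNormalize text).length : Int) := by
        have := Int.natCast_nonneg (pvNormalize text).length
        omega
      set b := PySem.Int.floordiv ((pvNormalize text).length : Int) np with hbdef
      have hbval : b = ((pvNormalize text).length : Int) / np :=
        PySem.Int.floordiv_eq_ediv_of_pos (by omega)
      have hb0 : 0 ≤ b := by
        rw [hbval]
        exact Int.ediv_nonneg (by omega) (by omega)
      have hnb : np * b ≤ ((pvNormalize text).length : Int) := by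
        have h1 := Int.emod_def ((pvNormalize text).length : Int) np
        have h2 := Int.emod_nonneg ((pvNormalize text).length : Int) (show np ≠ 0 by omega)
        rw [hbval]
        omega
      have htar : ∀ i ∈ PySem.List.pyRange 0 np 1, i ≠ np - 1 →
          (i + 1) * b + pvMul015 b < ((pvNormalize text).length : Int) := by
        intro i hi hine
        rw [PySem.List.mem_pyRange_one] at hi
        by_cases hbz : b = 0
        · have hoz : pvMul015 b = 0 := by rw [hbz]; exact pvMul015_zero
          rw [hoz, hbz, mul_zero]
          omega
        · have hb1 : 1 ≤ b := by omega
          have h3 := pvMul015_lt b hb1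
          have h1 : (i + 1) * b ≤ (np - 1) * b := mul_le_mul_of_nonneg_right (by omega) hb0
          have h2 : (np - 1) * b = np * b - b := by ring
          omega
      exact loop_eq (pvNormalize text) np b (pvMul015 b) _ [] [] rfl htar
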